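-- pv_equiv track=rewrite | github.com/Reno-Y/TI_101_PROJECT_PYTHON_RENAUD_ARSHDEEP | function.py | extraction_of_presidents_names
-- ===== SOURCE A (Python) =====
-- def extraction_of_presidents_names(speeches):
--     """
--     :param speeches: liste des fichiers dans le répertoire speeches
--     :return: un dictionnaire associant président : list[fichier]
--     """
--     association = {}
--     for speech in speeches:
--         if speech[:11] == "Nomination_" and speech[-4:] == ".txt":  # slice les noms des fichiers
--             last_name = speech[11:-4]
--             if last_name[-1].isdigit():  # vérifie si le dernier caractère est un chiffre
--                 last_name = last_name[:-1]
--             if last_name not in association: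
--                 association[last_name] = []
--             association[last_name].append(speech)
--
--     return association
-- ===== SOURCE B (Python) =====
-- def extraction_of_presidents_names(speeches):
--     # collect (last_name, speech) pairs in order, then group per distinct name by filtering
--     pairs = []
--     for speech in speeches:
--         if speech[:11] == "Nomination_" and speech[-4:] == ".txt":
--             last_name = speech[11:-4]
--             if last_name[-1].isdigit():
--                 last_name = last_name[:-1]
--             pairs.append((last_name, speech))
--     names = list(dict.fromkeys(name for name, _ in pairs))
--     return {name: [s for n, s in pairs if n == name] for name in names}
-- ===== Notes on version B (the rewrite author's own statement) =====
-- stated objective: alternative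
-- what changed: A builds the dict incrementally, creating and appending to per-president lists inside one loop; B first materialises the (name, speech) pair list, deduplicates the names with dict.fromkeys, and builds the result as a comprehension that filters the pair list per name.
import Mathlib
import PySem

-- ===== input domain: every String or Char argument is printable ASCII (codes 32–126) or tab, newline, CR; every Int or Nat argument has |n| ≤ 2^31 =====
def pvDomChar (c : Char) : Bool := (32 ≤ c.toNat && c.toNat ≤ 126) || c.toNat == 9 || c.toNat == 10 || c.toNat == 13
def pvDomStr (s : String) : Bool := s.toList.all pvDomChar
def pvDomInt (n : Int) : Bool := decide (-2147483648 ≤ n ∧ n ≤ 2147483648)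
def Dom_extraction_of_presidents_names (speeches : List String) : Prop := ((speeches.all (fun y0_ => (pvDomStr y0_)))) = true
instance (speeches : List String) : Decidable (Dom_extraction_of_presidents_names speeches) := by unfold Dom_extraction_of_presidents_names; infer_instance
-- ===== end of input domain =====

-- B groups the filtered (name, speech) pairs by deduplicated name + per-name filter instead of A's
-- incremental dict building; equivalence of the RETURN value on inputs where A raises no IndexError.

-- ===== PORT A =====
-- shared filter/strip step (both Pythons contain these same lines verbatim):
-- returns the extracted last name, or none when the filename is skipped or when
-- last_name[-1] would raise IndexError (empty last name; excluded by Pre_).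
def parseName (speech : String) : Option String :=
  if PySem.Str.slice speech (some 0) (some 11) = "Nomination_" ∧
     PySem.Str.slice speech (some (-4)) none = ".txt" then
    let n := PySem.Str.slice speech (some 11) (some (-4))
    match PySem.Str.pyGet? n (-1) with
    | some c => some (if PySem.Chars.isdigit c then PySem.Str.slice n none (some (-1)) else n)
    | none => none
  else none

def extraction_of_presidents_names (speeches : List String) : List (String × List String) :=
  (speeches.foldl (fun association speech =>
      match parseName speech with
      | none => association
      | some last_name =>
        let association :=
          if association.contains last_name then association
          else association.insert last_name ([] : List String)
        association.modify last_name [] (fun l => l ++ [speech]))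
    (PySem.Dict.empty : PySem.Dict String (List String))).items

-- ===== PORT B =====
def pairsOf (speeches : List String) : List (String × String) :=
  speeches.foldl (fun pairs speech =>
      match parseName speech with
      | none => pairs
      | some last_name => pairs ++ [(last_name, speech)]) []

def extraction_of_presidents_names_alt (speeches : List String) : List (String × List String) :=
  let pairs := pairsOf speeches
  let names := PySem.List.dedup (pairs.map Prod.fst)
  names.map (fun name => (name, (pairs.filter (fun p => p.1 == name)).map Prod.snd))

-- ===== PRECONDITION & SPEC =====
-- Excludes exactly the inputs where A raises IndexError: a filename of the accepted shape
-- "Nomination_*.txt" whose middle part is empty (last_name[-1] on the empty string).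
def Pre_extraction_of_presidents_names (speeches : List String) : Prop :=
  ∀ s ∈ speeches,
    ¬ (PySem.Str.slice s (some 0) (some 11) = "Nomination_" ∧
       PySem.Str.slice s (some (-4)) none = ".txt" ∧
       PySem.Str.slice s (some 11) (some (-4)) = "")
instance (speeches : List String) : Decidable (Pre_extraction_of_presidents_names speeches) := by
  unfold Pre_extraction_of_presidents_names; infer_instance

def pvWitness_extraction_of_presidents_names : List String :=
  ["Nomination_Trump1.txt", "Nomination_Obama.txt", "Nomination_Trump2.txt", "notes.txt"]

def Spec_extraction_of_presidents_names (speeches : List String) (out : List (String × List String)) : Prop := out = extraction_of_presidents_names_alt speeches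
instance (speeches : List String) (out : List (String × List String)) : Decidable (Spec_extraction_of_presidents_names speeches out) := by unfold Spec_extraction_of_presidents_names; infer_instance

-- ===== CLAIM (what is proved, stated in full; the proofs are below) =====
def Claim_equal_extraction_of_presidents_names : Prop := ∀ (speeches : List String), Dom_extraction_of_presidents_names speeches → Pre_extraction_of_presidents_names speeches → Spec_extraction_of_presidents_names speeches (extraction_of_presidents_names speeches)

-- ===== LEMMAS AND PROOFS =====

-- A's "if absent: insert []" followed by the append is one Dict.modify step.
theorem insert_nil_modify (d : PySem.Dict String (List String)) (k : String) (s : String) :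
    ((if d.contains k then d else d.insert k ([] : List String)).modify k []
        (fun l => l ++ [s])) = d.modify k [] (fun l => l ++ [s]) := by
  by_cases h : d.contains k = true
  · simp [h]
  · simp only [h, if_neg, Bool.not_eq_true, PySem.Dict.modify]
    rw [PySem.Dict.getD_insert_self, PySem.Dict.insert_insert_self,
      PySem.Dict.getD_of_not_contains d [] (by simpa using h)]

-- pairsOf's accumulator splits off.
theorem pairsOf_acc (speeches : List String) (acc : List (String × String)) :
    speeches.foldl (fun pairs speech =>
        match parseName speech with
        | none => pairs
        | some last_name => pairs ++ [(last_name, speech)]) acc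
      = acc ++ pairsOf speeches := by
  induction speeches generalizing acc with
  | nil => simp [pairsOf]
  | cons s ss ih =>
    simp only [List.foldl_cons, pairsOf]
    cases parseName s with
    | none => simpa [pairsOf] using ih acc
    | some n =>
      show _ = acc ++ List.foldl _ ([] ++ [(n, s)]) ss
      rw [ih (acc ++ [(n, s)]), show ([] ++ [(n, s)] : List (String × String)) = [(n, s)] from rfl,
        ih [(n, s)]]
      simp [pairsOf]

-- A's loop is the plain modify-grouping loop over the pair list.
theorem foldA_eq_pairs (speeches : List String) (d : PySem.Dict String (List String)) :
    speeches.foldl (fun association speech =>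
        match parseName speech with
        | none => association
        | some last_name =>
          let association :=
            if association.contains last_name then association
            else association.insert last_name ([] : List String)
          association.modify last_name [] (fun l => l ++ [speech])) d
      = (pairsOf speeches).foldl (fun d p => d.modify p.1 [] (fun l => l ++ [p.2])) d := by
  induction speeches generalizing d with
  | nil => simp [pairsOf]
  | cons s ss ih =>
    simp only [List.foldl_cons, pairsOf]
    cases hp : parseName s with
    | none => simpa [pairsOf, hp] using ih d
    | some n =>
      rw [pairsOf_acc]
      simp only [List.foldl_append, List.foldl_cons, List.foldl_nil]
      rw [insert_nil_modify]
      exact ih _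

-- ===== VERDICT (by name: the statement is the Claim_ definition above) =====
theorem extraction_of_presidents_names_spec : Claim_equal_extraction_of_presidents_names := by
  intro speeches _ _
  unfold Spec_extraction_of_presidents_names extraction_of_presidents_names extraction_of_presidents_names_alt
  dsimp only
  rw [foldA_eq_pairs]
  have hnd : ((pairsOf speeches).foldl (fun d p => d.modify p.1 [] (fun l => l ++ [p.2]))
      (PySem.Dict.empty : PySem.Dict String (List String))).keys.Nodup :=
    PySem.Dict.nodup_keys_foldl_modify_key (pairsOf speeches) Prod.fst []
      (fun _ p => fun l => l ++ [p.2]) _ PySem.Dict.nodup_keys_empty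
  rw [PySem.Dict.items_eq_map_keys _ hnd []]
  rw [PySem.Dict.keys_foldl_modify_key (pairsOf speeches) Prod.fst []
      (fun _ p => fun l => l ++ [p.2])]
  rw [PySem.Dict.keys_empty, PySem.Set.update_nil_left, PySem.List.dedup_eq_ofList]
  refine List.map_congr_left ?_
  intro k _
  rw [PySem.Dict.getD_foldl_modify_append, PySem.Dict.getD_empty]
  simp
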